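-- pv_equiv track=rewrite | github.com/heig-vd-iai/canopen-stack | testSchema.py | resolve_inheritance
-- ===== SOURCE A (Python) =====
-- def resolve_inheritance(objects: dict) -> dict:
--     def resolve(idx: int, visited: set[int]) -> dict:
--         obj = objects[idx]
--         inherit_id = obj.get("inherit")
--         if not inherit_id:
--             return obj
--         if inherit_id not in objects:
--             raise ValueError(f"Object {idx:04X}h inherits from unknown object {inherit_id:04X}h")
--         if inherit_id in visited:
--             raise ValueError(f"Circular inheritance involving {idx:04X}h")
--
--         base = resolve(inherit_id, visited | {idx})
--         merged = {**base, **obj}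
--         return merged
--
--     return {idx: resolve(idx, set()) for idx in objects}
-- ===== SOURCE B (Python) =====
-- def resolve_inheritance(objects: dict) -> dict:
--     resolved = {}
--     for idx in objects:
--         # walk up the inheritance chain until we hit an already-resolved
--         # object or a root, remembering the path
--         chain = []
--         cur = idx
--         while cur not in resolved:
--             obj = objects[cur]
--             parent = obj.get("inherit")
--             if not parent:
--                 resolved[cur] = obj
--                 break
--             if parent not in objects:
--                 raise ValueError(
--                     f"Object {cur:04X}h inherits from unknown object {parent:04X}h"
--                 )
--             if parent == idx or any(parent == c for c, _ in chain):
--                 raise ValueError(f"Circular inheritance involving {cur:04X}h")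
--             chain.append((cur, obj))
--             cur = parent
--         # fill the memo back down: one merge per object, each resolved once
--         for cur, obj in reversed(chain):
--             resolved[cur] = {**resolved[obj["inherit"]], **obj}
--     return {idx: resolved[idx] for idx in objects}
-- ===== Notes on version B (the rewrite author's own statement) =====
-- stated objective: alternative
-- what changed: A resolves every object by recursing through its whole ancestor chain with a visited set, re-merging all ancestors for each object; B instead keeps a memo dict and, per object, iteratively walks up only to the first already-resolved ancestor, then fills the memo back down with one merge per object.
import Mathlib
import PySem

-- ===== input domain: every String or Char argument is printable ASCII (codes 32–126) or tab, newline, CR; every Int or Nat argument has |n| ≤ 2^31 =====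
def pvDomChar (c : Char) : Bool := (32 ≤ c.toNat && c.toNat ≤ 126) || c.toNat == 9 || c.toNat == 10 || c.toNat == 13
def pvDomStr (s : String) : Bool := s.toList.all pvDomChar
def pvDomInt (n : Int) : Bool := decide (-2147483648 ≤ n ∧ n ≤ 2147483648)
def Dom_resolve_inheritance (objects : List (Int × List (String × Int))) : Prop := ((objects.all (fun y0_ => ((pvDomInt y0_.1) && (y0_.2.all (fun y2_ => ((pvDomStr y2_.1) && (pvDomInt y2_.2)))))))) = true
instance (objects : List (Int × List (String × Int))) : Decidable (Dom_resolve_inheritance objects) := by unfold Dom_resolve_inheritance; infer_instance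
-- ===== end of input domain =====

-- B replaces A's recursive re-resolution of every ancestor chain by a memo dict filled
-- iteratively: walk up to the first already-resolved ancestor, then fill the memo back
-- down (alternative algorithm; same return value on every input Pre_ admits).

-- the Python argument is a dict[int, dict[str, int]]: normalise the association list
-- into the nested PySem.Dict both programs receive (shared input decoding, not a port)
def pvNorm (objects : List (Int × List (String × Int))) : PySem.Dict Int (PySem.Dict String Int) :=
  PySem.Dict.ofList (objects.map (fun p => (p.1, PySem.Dict.ofList p.2)))

-- ===== PORT A =====
-- inner 'resolve(idx, visited)'; fuel only makes the recursion total, 'none' = the raises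
def pvResolveA (D : PySem.Dict Int (PySem.Dict String Int)) :
    Nat → Int → PySem.Set Int → Option (PySem.Dict String Int)
  | 0, _, _ => none
  | f + 1, idx, visited =>
    match D.get? idx with
    | none => none                                   -- objects[idx] KeyError (unreachable from the top)
    | some obj =>
      let inh := obj.getD "inherit" 0                -- obj.get("inherit"); 0 and missing are both falsy
      if inh = 0 then some obj
      else if D.contains inh = false then none       -- raise ValueError (unknown object)
      else if PySem.Set.contains visited inh then none  -- raise ValueError (circular)
      else
        match pvResolveA D f inh (PySem.Set.add visited idx) with
        | none => none
        | some base => some (base.update obj.items)  -- merged = {**base, **obj}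

def resolve_inheritance (objects : List (Int × List (String × Int))) : List (Int × List (String × Int)) :=
  let D := pvNorm objects
  D.keys.filterMap (fun idx =>
    (pvResolveA D (D.size + 1) idx PySem.Set.empty).map (fun v => (idx, v.items)))

-- ===== PORT B =====
-- the while-loop: walk up the chain until a memoised object or a root; fuel for totality
def pvWalk (D : PySem.Dict Int (PySem.Dict String Int)) :
    Nat → PySem.Dict Int (PySem.Dict String Int) → Int → Int →
    List (Int × PySem.Dict String Int) →
    Option (PySem.Dict Int (PySem.Dict String Int) × List (Int × PySem.Dict String Int))
  | 0, _, _, _, _ => none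
  | f + 1, r, idx, cur, chain =>
    if r.contains cur then some (r, chain)
    else
      match D.get? cur with
      | none => none
      | some obj =>
        let parent := obj.getD "inherit" 0
        if parent = 0 then some (r.insert cur obj, chain)
        else if D.contains parent = false then none      -- raise ValueError (unknown object)
        else if parent == idx || chain.any (fun c => c.1 == parent) then none  -- raise (circular)
        else pvWalk D f r idx parent (chain ++ [(cur, obj)])

-- the 'for cur, obj in reversed(chain)' fill-down loop: one merge per object
def pvFill (r : PySem.Dict Int (PySem.Dict String Int))
    (chain : List (Int × PySem.Dict String Int)) : PySem.Dict Int (PySem.Dict String Int) :=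
  chain.reverse.foldl
    (fun r p => r.insert p.1 ((r.getD (p.2.getD "inherit" 0) PySem.Dict.empty).update p.2.items)) r

def resolve_inheritance_alt (objects : List (Int × List (String × Int))) : List (Int × List (String × Int)) :=
  let D := pvNorm objects
  let resolved := D.keys.foldl
    (fun r idx =>
      match pvWalk D (D.size + 1) r idx idx [] with
      | none => r                                   -- the raise; unreachable inside Pre_
      | some (r', chain) => pvFill r' chain)
    PySem.Dict.empty
  D.keys.filterMap (fun idx => (resolved.get? idx).map (fun v => (idx, v.items)))

-- ===== PRECONDITION & SPEC =====
-- the inherit link of key k (0 = none); a plain lookup in the input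
def pvPar (D : PySem.Dict Int (PySem.Dict String Int)) (k : Int) : Int :=
  ((D.get? k).getD PySem.Dict.empty).getD "inherit" 0

-- the inherit chain from k reaches a root within n hops, every hop landing on a key
def pvTerm (D : PySem.Dict Int (PySem.Dict String Int)) : Nat → Int → Bool
  | 0, k => pvPar D k == 0
  | n + 1, k => pvPar D k == 0 || (D.contains (pvPar D k) && pvTerm D n (pvPar D k))

-- Pre_ excludes exactly the inputs on which A raises ValueError: an object whose inherit
-- link points to a missing key, or a cycle in the inheritance graph.
def Pre_resolve_inheritance (objects : List (Int × List (String × Int))) : Prop :=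
  ((pvNorm objects).keys.all (fun k => pvTerm (pvNorm objects) (pvNorm objects).size k)) = true

instance (objects : List (Int × List (String × Int))) : Decidable (Pre_resolve_inheritance objects) := by
  unfold Pre_resolve_inheritance; infer_instance

def pvWitness_resolve_inheritance : (List (Int × List (String × Int))) :=
  [(1, [("a", 2)]), (2, [("inherit", 1), ("b", 3)]), (3, [("inherit", 2), ("a", 9)])]

def Spec_resolve_inheritance (objects : List (Int × List (String × Int))) (out : List (Int × List (String × Int))) : Prop := out = resolve_inheritance_alt objects
instance (objects : List (Int × List (String × Int))) (out : List (Int × List (String × Int))) : Decidable (Spec_resolve_inheritance objects out) := by unfold Spec_resolve_inheritance; infer_instance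

-- ===== CLAIM (what is proved, stated in full; the proofs are below) =====
def Claim_equal_resolve_inheritance : Prop := ∀ (objects : List (Int × List (String × Int))), Dom_resolve_inheritance objects → Pre_resolve_inheritance objects → Spec_resolve_inheritance objects (resolve_inheritance objects)

-- ===== LEMMAS AND PROOFS =====

-- exact reachability: b lies k hops up a's inherit chain (each hop a real key)
def pvReach (D : PySem.Dict Int (PySem.Dict String Int)) : Nat → Int → Int → Prop
  | 0, a, b => a = b
  | k + 1, a, b => pvPar D a ≠ 0 ∧ D.contains (pvPar D a) = true ∧ pvReach D k (pvPar D a) b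

-- reference resolution: A's resolve without the visited set (proof-only)
def pvRf (D : PySem.Dict Int (PySem.Dict String Int)) : Nat → Int → Option (PySem.Dict String Int)
  | 0, _ => none
  | f + 1, idx =>
    match D.get? idx with
    | none => none
    | some obj =>
      let p := obj.getD "inherit" 0
      if p = 0 then some obj
      else if D.contains p = false then none
      else (pvRf D f p).map (fun b => b.update obj.items)

-- 'chain' is the walk from a to b: consecutive inherit links, all on real keys
def pvPath (D : PySem.Dict Int (PySem.Dict String Int)) :
    Int → List (Int × PySem.Dict String Int) → Int → Prop
  | a, [], b => a = b
  | a, (c, o) :: t, b =>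
      c = a ∧ D.get? a = some o ∧ o.getD "inherit" 0 ≠ 0 ∧
      D.contains (o.getD "inherit" 0) = true ∧ pvPath D (o.getD "inherit" 0) t b

theorem pvReach_term (D : PySem.Dict Int (PySem.Dict String Int)) :
    ∀ {k : Nat} {a b : Int} {n : Nat}, pvReach D k a b → pvTerm D n a = true →
      k ≤ n ∧ pvTerm D (n - k) b = true := by
  intro k
  induction k with
  | zero =>
    intro a b n hr ht
    simp only [pvReach] at hr
    subst hr
    exact ⟨Nat.zero_le _, ht⟩
  | succ k' ih =>
    intro a b n hr ht
    obtain ⟨hp, hc, hr'⟩ := hr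
    cases n with
    | zero =>
      simp only [pvTerm, beq_iff_eq] at ht
      exact absurd ht hp
    | succ n' =>
      simp only [pvTerm, Bool.or_eq_true, Bool.and_eq_true, beq_iff_eq] at ht
      rcases ht with h0 | ⟨_, ht'⟩
      · exact absurd h0 hp
      · obtain ⟨hle, htb⟩ := ih hr' ht'
        exact ⟨by omega, by simpa [Nat.succ_sub_succ] using htb⟩

theorem pvNo_self (D : PySem.Dict Int (PySem.Dict String Int)) :
    ∀ {n k : Nat} {a : Int}, pvTerm D n a = true → pvReach D (k + 1) a a → False := by
  intro n
  induction n using Nat.strong_induction_on with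
  | _ n ih =>
    intro k a ht hr
    obtain ⟨hle, ht'⟩ := pvReach_term D hr ht
    exact ih (n - (k + 1)) (by omega) ht' hr

theorem pvPar_eq (D : PySem.Dict Int (PySem.Dict String Int)) {idx : Int}
    {obj : PySem.Dict String Int} (h : D.get? idx = some obj) :
    pvPar D idx = obj.getD "inherit" 0 := by
  simp [pvPar, h]

theorem pvRf_stable (D : PySem.Dict Int (PySem.Dict String Int)) :
    ∀ {n : Nat} {idx : Int} {f : Nat}, pvTerm D n idx = true → n < f →
      pvRf D f idx = pvRf D (n + 1) idx := by
  intro n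
  induction n with
  | zero =>
    intro idx f ht hf
    obtain ⟨f', rfl⟩ : ∃ f', f = f' + 1 := ⟨f - 1, by omega⟩
    simp only [pvTerm, beq_iff_eq] at ht
    cases hg : D.get? idx with
    | none => simp [pvRf, hg]
    | some obj =>
      rw [pvPar_eq D hg] at ht
      simp [pvRf, hg, ht]
  | succ n' ih =>
    intro idx f ht hf
    obtain ⟨f', rfl⟩ : ∃ f', f = f' + 1 := ⟨f - 1, by omega⟩
    cases hg : D.get? idx with
    | none => simp [pvRf, hg]
    | some obj =>
      simp only [pvTerm, Bool.or_eq_true, Bool.and_eq_true, beq_iff_eq, pvPar_eq D hg] at ht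
      by_cases hp : obj.getD "inherit" 0 = 0
      · simp [pvRf, hg, hp]
      · rcases ht with h0 | ⟨hc, ht'⟩
        · exact absurd h0 hp
        · rw [show pvRf D (n' + 1 + 1) idx =
                Option.map (fun b => b.update obj.items) (pvRf D (n' + 1) (obj.getD "inherit" 0)) from by
              simp [pvRf, hg, hp, hc]]
          rw [← ih ht' (f := f') (by omega)]
          simp [pvRf, hg, hp, hc]

theorem pvSet_contains_add {s : PySem.Set Int} {x j : Int}
    (h : PySem.Set.contains (PySem.Set.add s x) j = true) :
    PySem.Set.contains s j = true ∨ j = x := by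
  by_cases hc : PySem.Set.contains s x
  · rw [PySem.Set.add, if_pos hc] at h
    exact Or.inl h
  · rw [PySem.Set.add, if_neg hc] at h
    simp only [PySem.Set.contains, List.contains_append,
      Bool.or_eq_true] at h ⊢
    rcases h with h | h
    · exact Or.inl h
    · simp at h
      exact Or.inr h

theorem pvSet_contains_empty (j : Int) :
    PySem.Set.contains (PySem.Set.empty : PySem.Set Int) j = false := by
  rfl

-- A's resolve equals the reference resolution whenever the chain terminates and the
-- visited set contains nothing reachable from idx (so the circularity check never fires)
theorem pvResolveA_eq (D : PySem.Dict Int (PySem.Dict String Int)) :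
    ∀ {n : Nat} {idx : Int} {vis : PySem.Set Int} {f : Nat},
      pvTerm D n idx = true →
      (∀ j, PySem.Set.contains vis j = true → ∀ k, ¬ pvReach D k idx j) →
      n < f → pvResolveA D f idx vis = pvRf D f idx := by
  intro n
  induction n with
  | zero =>
    intro idx vis f ht _ hf
    obtain ⟨f', rfl⟩ : ∃ f', f = f' + 1 := ⟨f - 1, by omega⟩
    cases hg : D.get? idx with
    | none => simp [pvResolveA, pvRf, hg]
    | some obj =>
      simp only [pvTerm, beq_iff_eq, pvPar_eq D hg] at ht
      simp [pvResolveA, pvRf, hg, ht]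
  | succ n' ih =>
    intro idx vis f ht hvis hf
    obtain ⟨f', rfl⟩ : ∃ f', f = f' + 1 := ⟨f - 1, by omega⟩
    cases hg : D.get? idx with
    | none => simp [pvResolveA, pvRf, hg]
    | some obj =>
      simp only [pvTerm, Bool.or_eq_true, Bool.and_eq_true, beq_iff_eq, pvPar_eq D hg] at ht
      by_cases hp : obj.getD "inherit" 0 = 0
      · simp [pvResolveA, pvRf, hg, hp]
      · rcases ht with h0 | ⟨hc, ht'⟩
        · exact absurd h0 hp
        · have hpar : pvPar D idx = obj.getD "inherit" 0 := pvPar_eq D hg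
          have hstep : ∀ k j, pvReach D k (obj.getD "inherit" 0) j → pvReach D (k + 1) idx j := by
            intro k j hr
            show pvPar D idx ≠ 0 ∧ D.contains (pvPar D idx) = true ∧ pvReach D k (pvPar D idx) j
            rw [hpar]
            exact ⟨hp, hc, hr⟩
          have htFull : pvTerm D (n' + 1) idx = true := by
            simp only [pvTerm, Bool.or_eq_true, Bool.and_eq_true, beq_iff_eq, hpar]
            exact Or.inr ⟨hc, ht'⟩
          have hreach1 : pvReach D 1 idx (obj.getD "inherit" 0) :=
            hstep 0 _ rfl
          have hv : PySem.Set.contains vis (obj.getD "inherit" 0) = false := by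
            by_contra hx
            exact hvis _ (Bool.not_eq_false _ ▸ hx) 1 hreach1
          have hvis' : ∀ j, PySem.Set.contains (PySem.Set.add vis idx) j = true →
              ∀ k, ¬ pvReach D k (obj.getD "inherit" 0) j := by
            intro j hj k hr
            rcases pvSet_contains_add hj with hj' | heq
            · exact hvis j hj' (k + 1) (hstep k j hr)
            · exact pvNo_self D htFull (heq ▸ hstep k j hr)
          have hrec := ih ht' hvis' (f := f') (by omega)
          simp only [pvResolveA, pvRf, hg, if_neg hp, hc, Bool.true_eq_false, if_false, hv,
            Bool.false_eq_true, hrec]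
          cases pvRf D f' (obj.getD "inherit" 0) <;> simp

theorem pvPath_append (D : PySem.Dict Int (PySem.Dict String Int)) :
    ∀ {ch : List (Int × PySem.Dict String Int)} {a b : Int} {o : PySem.Dict String Int},
      pvPath D a ch b → D.get? b = some o → o.getD "inherit" 0 ≠ 0 →
      D.contains (o.getD "inherit" 0) = true →
      pvPath D a (ch ++ [(b, o)]) (o.getD "inherit" 0) := by
  intro ch
  induction ch with
  | nil =>
    intro a b o hp hg hne hc
    cases hp
    exact ⟨rfl, hg, hne, hc, rfl⟩
  | cons hd t ih =>
    intro a b o hp hg hne hc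
    obtain ⟨c, od⟩ := hd
    obtain ⟨h1, h2, h3, h4, h5⟩ := hp
    exact ⟨h1, h2, h3, h4, ih h5 hg hne hc⟩

theorem pvPath_snoc (D : PySem.Dict Int (PySem.Dict String Int)) :
    ∀ {ch : List (Int × PySem.Dict String Int)} {a b c : Int} {o : PySem.Dict String Int},
      pvPath D a (ch ++ [(c, o)]) b →
      pvPath D a ch c ∧ D.get? c = some o ∧ o.getD "inherit" 0 = b ∧
        o.getD "inherit" 0 ≠ 0 ∧ D.contains b = true := by
  intro ch
  induction ch with
  | nil =>
    intro a b c o hp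
    obtain ⟨h1, h2, h3, h4, h5⟩ := hp
    cases h5
    exact ⟨h1.symm, h1 ▸ h2, rfl, h3, h4⟩
  | cons hd t ih =>
    intro a b c o hp
    obtain ⟨cc, od⟩ := hd
    obtain ⟨h1, h2, h3, h4, h5⟩ := hp
    obtain ⟨g1, g2, g3, g4, g5⟩ := ih h5
    exact ⟨⟨h1, h2, h3, h4, g1⟩, g2, g3, g4, g5⟩

theorem pvReach_step (D : PySem.Dict Int (PySem.Dict String Int)) {a j : Int} {k : Nat}
    (hp : pvPar D a ≠ 0) (hc : D.contains (pvPar D a) = true)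
    (hr : pvReach D k (pvPar D a) j) : pvReach D (k + 1) a j :=
  ⟨hp, hc, hr⟩

theorem pvPath_reach (D : PySem.Dict Int (PySem.Dict String Int)) :
    ∀ {ch : List (Int × PySem.Dict String Int)} {a b : Int},
      pvPath D a ch b → pvReach D ch.length a b := by
  intro ch
  induction ch with
  | nil => intro a b hp; exact hp
  | cons hd t ih =>
    intro a b hp
    obtain ⟨c, o⟩ := hd
    obtain ⟨h1, h2, h3, h4, h5⟩ := hp
    exact pvReach_step D (pvPar_eq D h2 ▸ h3) (pvPar_eq D h2 ▸ h4) (pvPar_eq D h2 ▸ ih h5)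

theorem pvPath_mem_reach (D : PySem.Dict Int (PySem.Dict String Int)) :
    ∀ {ch : List (Int × PySem.Dict String Int)} {a b c : Int} {o : PySem.Dict String Int},
      pvPath D a ch b → (c, o) ∈ ch →
      (∃ i, pvReach D i a c) ∧ (∃ j, pvReach D j c b) := by
  intro ch
  induction ch with
  | nil => intro a b c o _ hm; cases hm
  | cons hd t ih =>
    intro a b c o hp hm
    obtain ⟨cc, od⟩ := hd
    obtain ⟨h1, h2, h3, h4, h5⟩ := hp
    rcases List.mem_cons.mp hm with heq | hm'
    · injection heq with he1 he2
      subst he1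
      subst h1
      exact ⟨⟨0, rfl⟩, ⟨t.length + 1,
        pvReach_step D (pvPar_eq D h2 ▸ h3) (pvPar_eq D h2 ▸ h4)
          (pvPar_eq D h2 ▸ pvPath_reach D h5)⟩⟩
    · obtain ⟨⟨i, hi⟩, ⟨j, hj⟩⟩ := ih h5 hm'
      subst h1
      exact ⟨⟨i + 1, pvReach_step D (pvPar_eq D h2 ▸ h3) (pvPar_eq D h2 ▸ h4)
        (pvPar_eq D h2 ▸ hi)⟩, ⟨j, hj⟩⟩

theorem pvRf_char (D : PySem.Dict Int (PySem.Dict String Int)) {idx : Int}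
    {obj : PySem.Dict String Int} {n f : Nat}
    (hg : D.get? idx = some obj) (hp : obj.getD "inherit" 0 ≠ 0)
    (hc : D.contains (obj.getD "inherit" 0) = true)
    (ht : pvTerm D n idx = true) (hf : n < f) :
    pvRf D f idx = (pvRf D f (obj.getD "inherit" 0)).map (fun b => b.update obj.items) := by
  obtain ⟨f', rfl⟩ : ∃ f', f = f' + 1 := ⟨f - 1, by omega⟩
  obtain ⟨n', rfl⟩ : ∃ n', n = n' + 1 := by
    cases n with
    | zero =>
      simp only [pvTerm, beq_iff_eq, pvPar_eq D hg] at ht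
      exact absurd ht hp
    | succ n' => exact ⟨n', rfl⟩
  simp only [pvTerm, Bool.or_eq_true, Bool.and_eq_true, beq_iff_eq, pvPar_eq D hg] at ht
  rcases ht with h0 | ⟨_, ht'⟩
  · exact absurd h0 hp
  · have e1 : pvRf D f' (obj.getD "inherit" 0) = pvRf D (n' + 1) (obj.getD "inherit" 0) :=
      pvRf_stable D ht' (by omega)
    have e2 : pvRf D (f' + 1) (obj.getD "inherit" 0) = pvRf D (n' + 1) (obj.getD "inherit" 0) :=
      pvRf_stable D ht' (by omega)
    have unfoldL : pvRf D (f' + 1) idx =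
        (pvRf D f' (obj.getD "inherit" 0)).map (fun b => b.update obj.items) := by
      simp only [pvRf, hg, if_neg hp, hc, Bool.true_eq_false, if_false]
    rw [unfoldL, e1, e2]

-- the memo invariant: everything stored is the reference resolution of its key
def pvInv (D r : PySem.Dict Int (PySem.Dict String Int)) (F : Nat) : Prop :=
  ∀ k v, r.get? k = some v → pvRf D F k = some v

theorem pvFill_ok (D : PySem.Dict Int (PySem.Dict String Int)) (F : Nat) :
    ∀ (ch : List (Int × PySem.Dict String Int)) (a b : Int)
      (r : PySem.Dict Int (PySem.Dict String Int)),
      pvPath D a ch b → pvInv D r F → r.contains b = true →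
      (∀ p ∈ ch, ∃ m, m < F ∧ pvTerm D m p.1 = true) →
      pvInv D (pvFill r ch) F ∧
        (∀ k, r.contains k = true → (pvFill r ch).contains k = true) ∧
        (pvFill r ch).contains a = true := by
  intro ch
  induction ch using List.reverseRecOn with
  | nil =>
    intro a b r hp hinv hcb _
    cases hp
    exact ⟨hinv, fun k h => h, hcb⟩
  | append_singleton ch p ih =>
    intro a b r hp hinv hcb hterm
    obtain ⟨c, o⟩ := p
    obtain ⟨hp', hg, hpo, hne, hcB⟩ := pvPath_snoc D hp
    have hfill : pvFill r (ch ++ [(c, o)]) =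
        pvFill (r.insert c ((r.getD (o.getD "inherit" 0) PySem.Dict.empty).update o.items)) ch := by
      simp [pvFill, List.reverse_append]
    obtain ⟨vb, hgb⟩ : ∃ vb, r.get? b = some vb := by
      have : (r.get? b).isSome = true := by
        rw [← PySem.Dict.contains_eq_isSome_get?]; exact hcb
      exact Option.isSome_iff_exists.mp this
    have hvb : pvRf D F b = some vb := hinv b vb hgb
    have hgetD : r.getD (o.getD "inherit" 0) PySem.Dict.empty = vb := by
      rw [hpo, PySem.Dict.getD_eq_get?_getD, hgb]
      rfl
    obtain ⟨m, hm, htc⟩ := (hterm (c, o) (by simp)).imp (fun m h => h)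
    have hrfc : pvRf D F c = some (vb.update o.items) := by
      rw [pvRf_char D hg hne (hpo ▸ hcB) htc hm, hpo, hvb]
      rfl
    set r1 := r.insert c ((r.getD (o.getD "inherit" 0) PySem.Dict.empty).update o.items) with hr1
    have hinv1 : pvInv D r1 F := by
      intro k v hk
      rw [hr1, PySem.Dict.get?_insert] at hk
      by_cases hkc : k = c
      · rw [if_pos hkc] at hk
        injection hk with hk
        rw [hkc, hrfc, ← hk, hgetD]
      · rw [if_neg hkc] at hk
        exact hinv k v hk
    have hc1 : r1.contains c = true := PySem.Dict.contains_insert_self ..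
    have hmono1 : ∀ k, r.contains k = true → r1.contains k = true := by
      intro k hk
      rw [hr1, PySem.Dict.contains_insert, hk, Bool.or_true]
    obtain ⟨hinv2, hmono2, hca⟩ := ih a c r1 hp' hinv1 hc1
      (fun p hp0 => hterm p (by simp [hp0]))
    rw [hfill]
    exact ⟨hinv2, fun k hk => hmono2 k (hmono1 k hk), hca⟩

theorem pvReach_trans (D : PySem.Dict Int (PySem.Dict String Int)) :
    ∀ (i : Nat) {a b c : Int} (j : Nat), pvReach D i a b → pvReach D j b c →
      pvReach D (i + j) a c := by
  intro i
  induction i with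
  | zero =>
    intro a b c j h1 h2
    cases h1
    rw [Nat.zero_add]
    exact h2
  | succ i' ihi =>
    intro a b c j h1 h2
    obtain ⟨a1, a2, a3⟩ := h1
    have h3 := ihi j a3 h2
    have e : i' + 1 + j = (i' + j) + 1 := by omega
    rw [e]
    exact ⟨a1, a2, h3⟩

theorem pvWalk_ok (D : PySem.Dict Int (PySem.Dict String Int)) (F N : Nat) :
    ∀ (f n : Nat) (r : PySem.Dict Int (PySem.Dict String Int)) (idx cur : Int)
      (chain : List (Int × PySem.Dict String Int)),
      pvInv D r F → D.contains cur = true → pvPath D idx chain cur →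
      pvTerm D n cur = true → n < f → n < F → pvTerm D N idx = true →
      ∃ r' ext b,
        pvWalk D f r idx cur chain = some (r', chain ++ ext) ∧
        pvInv D r' F ∧ (∀ k, r.contains k = true → r'.contains k = true) ∧
        pvPath D cur ext b ∧ r'.contains b = true ∧
        (∀ p ∈ ext, ∃ m, m < F ∧ pvTerm D m p.1 = true) := by
  intro f
  induction f with
  | zero => intro n r idx cur chain _ _ _ _ h; omega
  | succ f' ih =>
    intro n r idx cur chain hinv hccur hpath ht hf hFn htN
    by_cases hrc : r.contains cur = true
    · refine ⟨r, [], cur, ?_, hinv, fun k h => h, rfl, hrc, by simp⟩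
      simp [pvWalk, hrc]
    · obtain ⟨obj, hg⟩ : ∃ obj, D.get? cur = some obj := by
        have : (D.get? cur).isSome = true := by
          rw [← PySem.Dict.contains_eq_isSome_get?]; exact hccur
        exact Option.isSome_iff_exists.mp this
      by_cases hp : obj.getD "inherit" 0 = 0
      · -- root: memoise obj and stop
        refine ⟨r.insert cur obj, [], cur, ?_, ?_, ?_, rfl, PySem.Dict.contains_insert_self .., by simp⟩
        · simp [pvWalk, hrc, hg, hp]
        · intro k v hk
          rw [PySem.Dict.get?_insert] at hk
          by_cases hkc : k = cur
          · rw [if_pos hkc] at hk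
            injection hk with hk
            subst hkc
            subst hk
            obtain ⟨ff, rfl⟩ : ∃ ff, F = ff + 1 := ⟨F - 1, by omega⟩
            simp [pvRf, hg, hp]
          · rw [if_neg hkc] at hk
            exact hinv k v hk
        · intro k hk
          rw [PySem.Dict.contains_insert, hk, Bool.or_true]
      · -- has a parent
        have hterm1 : D.contains (obj.getD "inherit" 0) = true ∧
            ∃ n', n = n' + 1 ∧ pvTerm D n' (obj.getD "inherit" 0) = true := by
          cases n with
          | zero =>
            simp only [pvTerm, beq_iff_eq, pvPar_eq D hg] at ht
            exact absurd ht hp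
          | succ n' =>
            simp only [pvTerm, Bool.or_eq_true, Bool.and_eq_true, beq_iff_eq,
              pvPar_eq D hg] at ht
            rcases ht with h0 | ⟨hc, ht'⟩
            · exact absurd h0 hp
            · exact ⟨hc, n', rfl, ht'⟩
        obtain ⟨hc, n', rfl, ht'⟩ := hterm1
        -- the circularity check cannot fire
        have hstep1 : ∀ j : Int, obj.getD "inherit" 0 = j → pvReach D 1 cur j := by
          intro j hj
          refine ⟨?_, ?_, ?_⟩ <;> rw [pvPar_eq D hg]
          · exact hp
          · exact hc
          · exact hj
        have hnotidx : (obj.getD "inherit" 0 == idx) = false := by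
          rw [beq_eq_false_iff_ne]
          intro heq
          exact pvNo_self D htN
            (pvReach_trans D chain.length 1 (pvPath_reach D hpath) (hstep1 idx heq))
        have hnotchain : (chain.any (fun c => c.1 == obj.getD "inherit" 0)) = false := by
          rw [Bool.eq_false_iff]
          intro hany
          obtain ⟨⟨c0, o0⟩, hmem, hbeq⟩ := List.any_eq_true.mp hany
          rw [beq_iff_eq] at hbeq
          obtain ⟨⟨i, hi⟩, ⟨j, hj⟩⟩ := pvPath_mem_reach D hpath hmem
          have htc0 : pvTerm D (N - i) c0 = true := (pvReach_term D hi htN).2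
          exact pvNo_self D htc0
            (pvReach_trans D j 1 hj (hstep1 c0 hbeq.symm))
        -- take the recursive step
        obtain ⟨r', ext, b, hw, hinv', hmono', hpath', hcb, hterms⟩ :=
          ih n' r idx (obj.getD "inherit" 0) (chain ++ [(cur, obj)]) hinv hc
            (pvPath_append D hpath hg hp hc) ht' (by omega) (by omega) htN
        refine ⟨r', (cur, obj) :: ext, b, ?_, hinv', hmono', ⟨rfl, hg, hp, hc, hpath'⟩, hcb, ?_⟩
        · have : pvWalk D (f' + 1) r idx cur chain =
              pvWalk D f' r idx (obj.getD "inherit" 0) (chain ++ [(cur, obj)]) := by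
            simp [pvWalk, hrc, hg, hp, hc, hnotidx, hnotchain]
          rw [this, hw, List.append_assoc]
          rfl
        · intro p hpmem
          rcases List.mem_cons.mp hpmem with rfl | hpm
          · exact ⟨n' + 1, by omega, by
              simp only [pvTerm, Bool.or_eq_true, Bool.and_eq_true, beq_iff_eq, pvPar_eq D hg]
              exact Or.inr ⟨hc, ht'⟩⟩
          · exact hterms p hpm
theorem pvInv_empty (D : PySem.Dict Int (PySem.Dict String Int)) (F : Nat) :
    pvInv D PySem.Dict.empty F := by
  intro k v h
  rw [PySem.Dict.get?_empty] at h
  cases h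

theorem pvFold_ok (D : PySem.Dict Int (PySem.Dict String Int)) :
    ∀ (ks : List Int) (r : PySem.Dict Int (PySem.Dict String Int)),
      (∀ k ∈ ks, D.contains k = true ∧ pvTerm D D.size k = true) →
      pvInv D r (D.size + 1) →
      pvInv D (ks.foldl
        (fun r idx =>
          match pvWalk D (D.size + 1) r idx idx [] with
          | none => r
          | some (r', chain) => pvFill r' chain) r) (D.size + 1) ∧
      (∀ k, r.contains k = true → (ks.foldl
        (fun r idx =>
          match pvWalk D (D.size + 1) r idx idx [] with
          | none => r
          | some (r', chain) => pvFill r' chain) r).contains k = true) ∧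
      (∀ k ∈ ks, (ks.foldl
        (fun r idx =>
          match pvWalk D (D.size + 1) r idx idx [] with
          | none => r
          | some (r', chain) => pvFill r' chain) r).contains k = true) := by
  intro ks
  induction ks with
  | nil =>
    intro r _ hinv
    exact ⟨hinv, fun k h => h, fun k h => absurd h (List.not_mem_nil)⟩
  | cons k0 ks ih =>
    intro r hks hinv
    obtain ⟨hc0, ht0⟩ := hks k0 (by simp)
    obtain ⟨r', ext, b, hw, hinv', hmono', hpath', hcb, hterms⟩ :=
      pvWalk_ok D (D.size + 1) D.size (D.size + 1) D.size r k0 k0 [] hinv hc0 rfl ht0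
        (by omega) (by omega) ht0
    obtain ⟨hinvF, hmonoF, hcaF⟩ :=
      pvFill_ok D (D.size + 1) ext k0 b r' hpath' hinv' hcb hterms
    have hstep : (match pvWalk D (D.size + 1) r k0 k0 [] with
          | none => r
          | some (r', chain) => pvFill r' chain) = pvFill r' ext := by
      simp only [hw, List.nil_append]
    obtain ⟨ih1, ih2, ih3⟩ := ih (pvFill r' ext) (fun k hk => hks k (by simp [hk])) hinvF
    rw [List.foldl_cons, hstep]
    refine ⟨ih1, ?_, ?_⟩
    · intro k hk
      exact ih2 k (hmonoF k (hmono' k hk))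
    · intro k hk
      rcases List.mem_cons.mp hk with rfl | hk'
      · exact ih2 k hcaF
      · exact ih3 k hk'

-- ===== VERDICT (by name: the statement is the Claim_ definition above) =====
theorem resolve_inheritance_spec : Claim_equal_resolve_inheritance := by
  intro objects _ hpre
  unfold Spec_resolve_inheritance
  unfold Pre_resolve_inheritance at hpre
  rw [List.all_eq_true] at hpre
  simp only [resolve_inheritance, resolve_inheritance_alt]
  apply List.filterMap_congr
  intro x hx
  have ht : pvTerm (pvNorm objects) (pvNorm objects).size x = true := hpre x hx
  obtain ⟨hinvF, _, hallF⟩ :=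
    pvFold_ok (pvNorm objects) (pvNorm objects).keys PySem.Dict.empty
      (fun k hk => ⟨(PySem.Dict.contains_iff_mem_keys _ _).mpr hk, hpre k hk⟩)
      (pvInv_empty (pvNorm objects) _)
  obtain ⟨v, hv⟩ : ∃ v, ((pvNorm objects).keys.foldl
      (fun r idx =>
        match pvWalk (pvNorm objects) ((pvNorm objects).size + 1) r idx idx [] with
        | none => r
        | some (r', chain) => pvFill r' chain) PySem.Dict.empty).get? x = some v := by
    have := hallF x hx
    have hs : (((pvNorm objects).keys.foldl
        (fun r idx =>
          match pvWalk (pvNorm objects) ((pvNorm objects).size + 1) r idx idx [] with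
          | none => r
          | some (r', chain) => pvFill r' chain) PySem.Dict.empty).get? x).isSome = true := by
      rw [← PySem.Dict.contains_eq_isSome_get?]
      exact this
    exact Option.isSome_iff_exists.mp hs
  have hrfx : pvRf (pvNorm objects) ((pvNorm objects).size + 1) x = some v := hinvF x v hv
  have hA : pvResolveA (pvNorm objects) ((pvNorm objects).size + 1) x PySem.Set.empty =
      pvRf (pvNorm objects) ((pvNorm objects).size + 1) x := by
    apply pvResolveA_eq (pvNorm objects) ht
    · intro j hj
      rw [pvSet_contains_empty] at hj
      cases hj
    · omega
  rw [hA, hrfx, hv]
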